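-- pv_equiv track=rewrite | github.com/LuisDMM/Hack_Python_2 | hack_6.py | fn_hack_6
-- ===== SOURCE A (Python) =====
-- def fn_hack_6(s):
--     result = s
--     alfabeto = 'abcdefghijklmnopqrstuvwxyz'
--     letras = []
--
--     for i in range(0, len(s), 2):
--         letras.extend([s[i], "-"])
--     if letras and letras[-1] == "-":
--         letras.pop()
--     if not letras:
--         return ["0"]
--     for i in range(len(letras)):
--         if letras[i].isalpha():
--             indice = alfabeto.index(letras[i].lower()) + 1
--             letras[i] = str(indice)
--
--     return letras
-- ===== SOURCE B (Python) =====
-- def fn_hack_6(s):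
--     def tok(c):
--         lc = c.lower()
--         return str(ord(lc) - 96) if 'a' <= lc <= 'z' else c
--
--     if not s:
--         return ["0"]
--     out = []
--     r = s
--     while r:
--         if out:
--             out.append("-")
--         out.append(tok(r[0]))
--         r = r[2:]
--     return out
-- ===== Notes on version B (the rewrite author's own statement) =====
-- stated objective: alternative
-- what changed: A interleaves char/dash pairs by index stride, pops the trailing dash, then a second pass mutates alphabetic entries in place via alphabet.index; B is one while-loop that consumes the string by slicing off two characters at a time, emits the dash separator before each token after the first, and converts letters by ord arithmetic with no dash creation or deletion and no second pass.
import Mathlib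
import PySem

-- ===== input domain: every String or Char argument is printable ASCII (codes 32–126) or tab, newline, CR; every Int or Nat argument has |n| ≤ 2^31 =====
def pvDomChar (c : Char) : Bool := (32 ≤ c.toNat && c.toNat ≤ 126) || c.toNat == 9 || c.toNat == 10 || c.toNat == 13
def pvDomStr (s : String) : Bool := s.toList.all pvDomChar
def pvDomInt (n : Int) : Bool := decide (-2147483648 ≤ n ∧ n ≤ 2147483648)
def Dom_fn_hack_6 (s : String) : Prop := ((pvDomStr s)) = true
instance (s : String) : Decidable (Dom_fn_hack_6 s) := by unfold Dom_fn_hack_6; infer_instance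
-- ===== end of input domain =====

-- B replaces A's interleave-dashes / pop-trailing-dash / second in-place conversion pass by a
-- single while-loop that consumes the string via r = r[2:], emits the separator before each
-- token after the first, and converts letters by ord arithmetic instead of alphabet.index.

-- ===== PORT A =====
-- alfabeto.index(x): Python str.index; ported via PySem.Chars.find, exact wherever the
-- substring is found (for the lowercased ASCII letters this branch reaches, it always is).
def pvTokA (t : String) : String :=
  if PySem.Str.strIsalpha t then
    PySem.Int.toStr (PySem.Chars.find "abcdefghijklmnopqrstuvwxyz".toList (PySem.Str.lower t).toList + 1)
  else t

def fn_hack_6 (s : String) : List String :=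
  let cs := s.toList
  -- for i in range(0, len(s), 2): letras.extend([s[i], "-"])   (i always in range)
  let letras := (PySem.List.pyRange 0 cs.length 2).foldl
      (fun acc i => acc ++ [String.singleton (PySem.List.pyGetD cs i ' '), "-"]) []
  -- if letras and letras[-1] == "-": letras.pop()
  let letras := if !letras.isEmpty && (PySem.List.pyGetD letras (-1) "" == "-")
      then letras.dropLast else letras
  if letras.isEmpty then ["0"]
  -- for i in range(len(letras)): replace alphabetic entries in place
  else letras.map pvTokA

-- ===== PORT B =====
-- tok(c): lc = c.lower() (charwise, exact on the ASCII domain); 'a' <= lc <= 'z' on the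
-- one-char string lc is the Char comparison; ord(lc) - 96 is the Nat code cast to Int.
def pvTokB (c : Char) : String :=
  let lc := PySem.Chars.lowerChar c
  if 'a' ≤ lc ∧ lc ≤ 'z' then PySem.Int.toStr ((lc.toNat : Int) - 96)
  else String.singleton c

-- while r: if out: out.append("-"); out.append(tok(r[0])); r = r[2:]
-- r[0] is ported with headD ' '; the loop body only runs when r is non-empty, so the
-- default is never used.
def pvLoopB (r : List Char) (out : List String) : List String :=
  if h : r.isEmpty then out
  else pvLoopB (PySem.List.slice r (some 2) none)
        ((if out.isEmpty then out else out ++ ["-"]) ++ [pvTokB (r.headD ' ')])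
termination_by r.length
decreasing_by
  rw [PySem.List.slice_from r (by norm_num : (0:Int) ≤ 2)]
  simp only [List.length_drop]
  have hne : r ≠ [] := by simpa using h
  have : 0 < r.length := List.length_pos_iff.mpr hne
  omega

def fn_hack_6_alt (s : String) : List String :=
  if s.toList.isEmpty then ["0"]
  else pvLoopB s.toList []

-- ===== PRECONDITION & SPEC =====
def Spec_fn_hack_6 (s : String) (out : List String) : Prop := out = fn_hack_6_alt s
instance (s : String) (out : List String) : Decidable (Spec_fn_hack_6 s out) := by unfold Spec_fn_hack_6; infer_instance

-- ===== CLAIM (what is proved, stated in full; the proofs are below) =====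
def Claim_equal_fn_hack_6 : Prop := ∀ (s : String), Dom_fn_hack_6 s → Spec_fn_hack_6 s (fn_hack_6 s)

-- ===== LEMMAS AND PROOFS =====

-- the every-other-character sublist, structurally
def pvEO : List Char → List Char
  | [] => []
  | [c] => [c]
  | c :: _ :: t => c :: pvEO t

theorem pvEO_subset (l : List Char) : ∀ x ∈ pvEO l, x ∈ l := by
  induction l using pvEO.induct with
  | case1 => simp [pvEO]
  | case2 c => simp [pvEO]
  | case3 c d t ih =>
    intro x hx
    rcases (by simpa [pvEO] using hx : x = c ∨ x ∈ pvEO t) with h | h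
    · simp [h]
    · simp [ih x h]

theorem pvEO_ne_nil (c : Char) (t : List Char) : pvEO (c :: t) ≠ [] := by
  cases t <;> simp [pvEO]

-- A's stride-indexed every-other list is pvEO
theorem pv_eo (l : List Char) :
    (List.range ((l.length + 1) / 2)).map (fun k => l.getD (2 * k) ' ') = pvEO l := by
  induction l using pvEO.induct with
  | case1 => rfl
  | case2 c => simp [pvEO, List.range_succ]
  | case3 c d t ih =>
    have hlen : (( (c :: d :: t).length + 1) / 2) = (t.length + 1) / 2 + 1 := by
      simp only [List.length_cons]; omega
    rw [hlen, List.range_succ_eq_map, List.map_cons, List.map_map]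
    show (c :: d :: t).getD 0 ' ' :: _ = pvEO (c :: d :: t)
    have hf : ((fun k => (c :: d :: t).getD (2 * k) ' ') ∘ Nat.succ)
        = fun k => t.getD (2 * k) ' ' := by
      funext k
      show (c :: d :: t).getD (2 * (k + 1)) ' ' = t.getD (2 * k) ' '
      have : 2 * (k + 1) = (2 * k) + 1 + 1 := by omega
      simp [this]
    rw [hf, ih]
    rfl

-- A's first loop builds the tokens-with-dashes list of the every-other characters.
theorem pv_lettersA (cs : List Char) :
    (PySem.List.pyRange 0 cs.length 2).foldl
      (fun acc i => acc ++ [String.singleton (PySem.List.pyGetD cs i ' '), "-"]) []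
    = ((List.range ((cs.length + 1) / 2)).map (fun k => cs.getD (2 * k) ' ')).flatMap
        (fun c => [String.singleton c, "-"]) := by
  rw [PySem.List.pyRange_of_pos _ _ (by norm_num : (0:Int) < 2)]
  have hc : (if (0:Int) < (cs.length : Int) then (((cs.length : Int) - 0 + 2 - 1) / 2).toNat else 0)
      = (cs.length + 1) / 2 := by split <;> omega
  rw [hc, List.foldl_map, PySem.List.foldl_append_eq_flatMap, List.flatMap_map]
  have hf : (fun k : Nat => [String.singleton (PySem.List.pyGetD cs (0 + 2 * (k:Int)) ' '), "-"])
      = fun k : Nat => [String.singleton (cs.getD (2 * k) ' '), "-"] := by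
    funext k
    have h2 : (0:Int) + 2 * (k:Int) = ((2 * k : Nat) : Int) := by push_cast; ring
    rw [h2, PySem.List.pyGetD_natCast]
  simp only [List.nil_append]
  rw [hf]

theorem pv_flatMap_ne_nil (c : Char) (t : List Char) :
    ((c :: t).flatMap (fun c => [String.singleton c, "-"])) ≠ [] := by
  intro hn
  exact absurd (List.flatMap_eq_nil_iff.mp hn c (by simp)) (by simp)

theorem pv_last (l : List Char) (h : l ≠ []) :
    (l.flatMap (fun c => [String.singleton c, "-"])).getLast? = some "-" := by
  induction l with
  | nil => simp at h
  | cons c t ih =>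
    cases t with
    | nil => rfl
    | cons d u =>
      rw [List.flatMap_cons, List.getLast?_append_of_ne_nil _ (pv_flatMap_ne_nil d u)]
      exact ih (by simp)

-- the token conversions agree on every domain character (checked exhaustively on codes < 127)
theorem pv_tok (c : Char) (h : pvDomChar c = true) :
    pvTokA (String.singleton c) = pvTokB c := by
  have hall : ∀ n < 127, pvTokA (String.singleton (Char.ofNat n)) = pvTokB (Char.ofNat n) := by
    decide
  have hc : c.toNat < 127 := by
    simp only [pvDomChar, Bool.or_eq_true, Bool.and_eq_true, decide_eq_true_eq, beq_iff_eq] at h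
    omega
  have := hall c.toNat hc
  rwa [show Char.ofNat c.toNat = c from Char.ofNat_toNat c] at this

-- A: drop the trailing dash and convert = intersperse of converted tokens
theorem pv_interA (l : List Char) :
    ((l.flatMap (fun c => [String.singleton c, "-"])).dropLast).map pvTokA
    = List.intersperse "-" (l.map (fun c => pvTokA (String.singleton c))) := by
  induction l with
  | nil => rfl
  | cons c t ih =>
    cases t with
    | nil => simp
    | cons d u =>
      rw [List.flatMap_cons]
      rw [show [String.singleton c, "-"] ++ ((d :: u).flatMap fun c => [String.singleton c, "-"])
            = String.singleton c :: "-" :: ((d :: u).flatMap fun c => [String.singleton c, "-"]) from rfl,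
        List.dropLast_cons₂, List.dropLast_cons_of_ne_nil (pv_flatMap_ne_nil d u)]
      rw [List.map_cons, List.map_cons, ih]
      have hdash : pvTokA "-" = "-" := by decide
      rw [hdash, List.map_cons]
      simp

theorem pv_inter_flatMap (t : String) (ts : List String) :
    List.intersperse "-" (t :: ts) = t :: ts.flatMap (fun x => ["-", x]) := by
  induction ts generalizing t with
  | nil => rfl
  | cons u v ih =>
    rw [show List.intersperse "-" (t :: u :: v) = t :: "-" :: List.intersperse "-" (u :: v) from by
      simp [List.intersperse], ih, List.flatMap_cons]
    rfl

-- B's loop with a non-empty accumulator appends "-",token pairs for the remaining strides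
theorem pv_loopB_acc (r : List Char) : ∀ out : List String, out ≠ [] →
    pvLoopB r out = out ++ (pvEO r).flatMap (fun c => ["-", pvTokB c]) := by
  induction r using pvEO.induct with
  | case1 =>
    intro out h
    rw [pvLoopB]
    simp [pvEO]
  | case2 c =>
    intro out h
    rw [pvLoopB, dif_neg (by simp)]
    rw [PySem.List.slice_from _ (by norm_num : (0:Int) ≤ 2)]
    rw [pvLoopB]
    simp [pvEO, h, List.isEmpty_iff]
  | case3 c d t ih =>
    intro out h
    rw [pvLoopB, dif_neg (by simp)]
    rw [PySem.List.slice_from _ (by norm_num : (0:Int) ≤ 2)]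
    show pvLoopB t _ = _
    rw [ih _ (by simp)]
    simp [pvEO, h, List.isEmpty_iff]

-- B's loop from the empty accumulator is the interspersed token list
theorem pv_loopB (c : Char) (t : List Char) :
    pvLoopB (c :: t) [] = List.intersperse "-" ((pvEO (c :: t)).map pvTokB) := by
  rw [pvLoopB, dif_neg (by simp)]
  simp only [List.isEmpty_nil, if_pos, List.nil_append]
  rw [PySem.List.slice_from _ (by norm_num : (0:Int) ≤ 2)]
  show pvLoopB ((c :: t).drop 2) [pvTokB (c :: t).head!] = _
  have hEO : pvEO (c :: t) = c :: pvEO ((c :: t).drop 2) := by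
    cases t <;> simp [pvEO]
  cases hnil : (c :: t).drop 2 with
  | nil =>
    rw [pvLoopB]
    simp [hEO, hnil, pvEO]
  | cons e u =>
    rw [pv_loopB_acc _ _ (by simp), hEO, hnil, List.map_cons, pv_inter_flatMap]
    simp [List.flatMap_map]

-- ===== VERDICT (by name: the statement is the Claim_ definition above) =====
theorem fn_hack_6_spec : Claim_equal_fn_hack_6 := by
  intro s hdom
  unfold Spec_fn_hack_6 fn_hack_6 fn_hack_6_alt
  simp only []
  rw [pv_lettersA, pv_eo]
  cases hcs : s.toList with
  | nil => simp [pvEO]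
  | cons c t =>
    have hpe : pvEO (c :: t) ≠ [] := pvEO_ne_nil c t
    obtain ⟨c', t', heq⟩ := List.exists_cons_of_ne_nil hpe
    rw [heq]
    have hfne := pv_flatMap_ne_nil c' t'
    have hlast := pv_last (c' :: t') (by simp)
    have hcond : (!((c' :: t').flatMap (fun c => [String.singleton c, "-"])).isEmpty
        && (PySem.List.pyGetD ((c' :: t').flatMap (fun c => [String.singleton c, "-"])) (-1) "" == "-")) = true := by
      have h1 : ((c' :: t').flatMap (fun c => [String.singleton c, "-"])).getLast hfne = "-" :=
        Option.some_inj.mp ((List.getLast?_eq_some_getLast hfne).symm.trans hlast)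
      rw [PySem.List.pyGetD_neg_one _ _ hfne, h1]
      simp
    rw [if_pos hcond, if_neg (by simp), if_neg (by simp)]
    rw [pv_interA, pv_loopB, ← heq]
    congr 1
    refine List.map_congr_left (fun x hx => pv_tok x ?_)
    have hxs : x ∈ s.toList := by
      rw [hcs]; exact pvEO_subset (c :: t) x hx
    unfold Dom_fn_hack_6 pvDomStr at hdom
    exact List.all_eq_true.mp hdom x hxs
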